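-- pv_equiv track=rewrite | github.com/Zulenka/ProjectMinerva | scripts/build_greasyfork_additional_info.py | extract_latest_versions
-- ===== SOURCE A (Python) =====
-- def extract_latest_versions(version_history_text: str, limit: int = 8) -> list[tuple[str, list[str]]]:
--     sections: list[tuple[str, list[str]]] = []
--     current_version = None
--     current_lines: list[str] = []
--
--     for raw_line in version_history_text.splitlines():
--         line = raw_line.rstrip()
--         if line.startswith("## "):
--             if current_version:
--                 bullets = [ln[2:].strip() for ln in current_lines if ln.strip().startswith("- ")]
--                 sections.append((current_version, bullets))
--             current_version = line.replace("##", "", 1).strip()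
--             current_lines = []
--             continue
--         if current_version:
--             current_lines.append(line)
--
--     if current_version:
--         bullets = [ln[2:].strip() for ln in current_lines if ln.strip().startswith("- ")]
--         sections.append((current_version, bullets))
--
--     return sections[:limit]
-- ===== SOURCE B (Python) =====
-- def extract_latest_versions(version_history_text: str, limit: int = 8) -> list[tuple[str, list[str]]]:
--     # Single backward pass: scan the lines last-to-first, closing a section each
--     # time a "## " header is met, then reverse the collected sections.
--     sections: list[tuple[str, list[str]]] = []
--     pending: list[str] = []  # body lines of the section being assembled, in reverse order
--     for raw_line in reversed(version_history_text.splitlines()):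
--         ln = raw_line.rstrip()
--         if ln.startswith("## "):
--             title = ln[3:].strip()
--             if title:
--                 bullets = [b[2:].strip() for b in reversed(pending) if b.strip().startswith("- ")]
--                 sections.append((title, bullets))
--             pending = []
--         else:
--             pending.append(ln)
--     sections.reverse()
--     return sections[:limit]
-- ===== Notes on version B (the rewrite author's own statement) =====
-- stated objective: alternative
-- what changed: B replaces A's forward state machine (current_version/current_lines with a flush at each header and again after the loop) by a single backward pass over the lines that closes a section exactly when it meets a header line, followed by one final reverse; the end-of-input flush disappears and the title is taken by slicing off the three header characters instead of a replace-first-occurrence call.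
import Mathlib
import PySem

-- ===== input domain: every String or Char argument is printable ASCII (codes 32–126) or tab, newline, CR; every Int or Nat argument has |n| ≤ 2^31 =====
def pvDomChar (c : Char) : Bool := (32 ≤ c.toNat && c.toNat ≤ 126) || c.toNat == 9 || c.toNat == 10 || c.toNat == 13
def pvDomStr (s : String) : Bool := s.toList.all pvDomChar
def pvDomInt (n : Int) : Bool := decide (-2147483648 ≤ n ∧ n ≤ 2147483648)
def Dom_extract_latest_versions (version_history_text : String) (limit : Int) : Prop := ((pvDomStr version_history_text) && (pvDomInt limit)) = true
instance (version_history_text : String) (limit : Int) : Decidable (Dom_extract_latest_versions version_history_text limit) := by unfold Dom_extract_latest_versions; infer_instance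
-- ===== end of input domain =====

-- B replaces A's forward current_version/current_lines state machine by a single backward
-- pass that closes a section at each header (alternative decomposition, same O(n) cost).


-- ===== PORT A =====
-- str.replace(old, new, 1): replace the FIRST occurrence of `old` (exact for nonempty `old`,
-- which is how A calls it: old = "##").
def replFirst (s old new : List Char) : List Char :=
  match s with
  | [] => []
  | c :: rest =>
    if old.isPrefixOf (c :: rest) then new ++ (c :: rest).drop old.length
    else c :: replFirst rest old new

def strReplaceFirst (s old new : String) : String :=
  String.ofList (replFirst s.toList old.toList new.toList)

-- the bullets comprehension: [ln[2:].strip() for ln in cls if ln.strip().startswith("- ")]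
def bulletsA (cls : List String) : List String :=
  (cls.filter (fun ln => PySem.Str.startswith (PySem.Str.strip ln) "- ")).map
    (fun ln => PySem.Str.strip (PySem.Str.slice ln (some 2) none))

-- Python truthiness of current_version (None or "" are falsy)
def truthyA (o : Option String) : Bool :=
  match o with
  | none => false
  | some s => !(s == "")

-- A's for-loop, state = (sections, current_version, current_lines); the [] case is the
-- final flush after the loop.
def loopA (raws : List String) (secs : List (String × List String))
    (cv : Option String) (cls : List String) : List (String × List String) :=
  match raws with
  | [] => if truthyA cv then secs ++ [(cv.getD "", bulletsA cls)] else secs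
  | raw :: rest =>
    let line := PySem.Str.rstrip raw
    if PySem.Str.startswith line "## " then
      let secs' := if truthyA cv then secs ++ [(cv.getD "", bulletsA cls)] else secs
      loopA rest secs' (some (PySem.Str.strip (strReplaceFirst line "##" ""))) []
    else if truthyA cv then loopA rest secs cv (cls ++ [line])
    else loopA rest secs cv cls

def extract_latest_versions (version_history_text : String) (limit : Int) : List (String × List String) :=
  PySem.List.slice (loopA (PySem.Str.splitlines version_history_text) [] none []) none (some limit)

-- ===== PORT B =====
-- one step of B's backward scan, state = (sections, pending); pending holds the body lines
-- of the section being assembled, in reverse order.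
def stepB (st : List (String × List String) × List String) (raw : String) :
    List (String × List String) × List String :=
  let ln := PySem.Str.rstrip raw
  if PySem.Str.startswith ln "## " then
    let title := PySem.Str.strip (PySem.Str.slice ln (some 3) none)
    (if title == "" then st.1
     else st.1 ++ [(title,
       (st.2.reverse.filter (fun b => PySem.Str.startswith (PySem.Str.strip b) "- ")).map
         (fun b => PySem.Str.strip (PySem.Str.slice b (some 2) none)))],
     [])
  else (st.1, st.2 ++ [ln])

def extract_latest_versions_alt (version_history_text : String) (limit : Int) : List (String × List String) :=
  let st := ((PySem.Str.splitlines version_history_text).reverse).foldl stepB ([], [])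
  PySem.List.slice st.1.reverse none (some limit)

-- ===== PRECONDITION & SPEC =====
def Spec_extract_latest_versions (version_history_text : String) (limit : Int) (out : List (String × List String)) : Prop := out = extract_latest_versions_alt version_history_text limit
instance (version_history_text : String) (limit : Int) (out : List (String × List String)) : Decidable (Spec_extract_latest_versions version_history_text limit out) := by unfold Spec_extract_latest_versions; infer_instance

-- ===== CLAIM (what is proved, stated in full; the proofs are below) =====
def Claim_equal_extract_latest_versions : Prop := ∀ (version_history_text : String) (limit : Int), Dom_extract_latest_versions version_history_text limit → Spec_extract_latest_versions version_history_text limit (extract_latest_versions version_history_text limit)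

-- ===== LEMMAS AND PROOFS =====

-- split a (rstripped) line list at the first "## " header
def spanH : List String → List String × List String
  | [] => ([], [])
  | l :: rest =>
    if PySem.Str.startswith l "## " then ([], l :: rest)
    else
      let p := spanH rest
      (l :: p.1, p.2)

theorem spanH_snd_length_le (ls : List String) : (spanH ls).2.length ≤ ls.length := by
  induction ls with
  | nil => simp [spanH]
  | cons l rest ih =>
    simp only [spanH]
    split
    · simp
    · simpa using Nat.le_succ_of_le ih

-- the common specification: parse a list that is empty or starts with a header
def parseS : List String → List (String × List String)
  | [] => []
  | h :: rest =>
    let title := PySem.Str.strip (PySem.Str.slice h (some 3) none)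
    let p := spanH rest
    let tail := parseS p.2
    if title == "" then tail else (title, bulletsA p.1) :: tail
termination_by ls => ls.length
decreasing_by
  have := spanH_snd_length_le rest
  simpa using Nat.lt_succ_of_le this

theorem header_shape (l : String) (h : PySem.Str.startswith l "## " = true) :
    ∃ cs, l.toList = '#' :: '#' :: ' ' :: cs := by
  rw [PySem.Str.startswith_eq, PySem.Chars.startswith_iff] at h
  obtain ⟨t, ht⟩ := h
  exact ⟨t, by simpa using ht.symm⟩

theorem title_eq (l : String) (h : PySem.Str.startswith l "## " = true) :
    PySem.Str.strip (strReplaceFirst l "##" "") =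
      PySem.Str.strip (PySem.Str.slice l (some 3) none) := by
  obtain ⟨cs, hcs⟩ := header_shape l h
  rw [← String.toList_inj, PySem.Str.toList_strip, PySem.Str.toList_strip, PySem.Str.toList_slice,
    PySem.Chars.slice_eq_listSlice]
  have hsp : PySem.Chars.isspace ' ' = true := by decide
  simp [pysem, strReplaceFirst, hcs, replFirst, PySem.Chars.strip, PySem.Chars.lstrip, hsp,
    PySem.List.slice]

theorem loopA_spec (raws : List String) (secs : List (String × List String))
    (cv : Option String) (cls : List String) :
    loopA raws secs cv cls =
      secs ++
        (match cv with
         | some s =>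
           if s == "" then parseS (spanH (raws.map PySem.Str.rstrip)).2
           else (s, bulletsA (cls ++ (spanH (raws.map PySem.Str.rstrip)).1)) ::
             parseS (spanH (raws.map PySem.Str.rstrip)).2
         | none => parseS (spanH (raws.map PySem.Str.rstrip)).2) := by
  induction raws generalizing secs cv cls with
  | nil =>
    cases cv with
    | none => simp [loopA, truthyA, spanH, parseS]
    | some s =>
      by_cases hs : s == ""
      · simp [loopA, truthyA, spanH, parseS, hs]
      · simp [loopA, truthyA, spanH, parseS, hs, bulletsA]
  | cons raw rest ih =>
    simp only [loopA, List.map_cons]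
    by_cases hh : PySem.Str.startswith (PySem.Str.rstrip raw) "## " = true
    · rw [if_pos hh, ih]
      rw [title_eq _ hh]
      simp only [spanH, hh, if_pos, parseS]
      cases cv with
      | none =>
        by_cases ht : PySem.Str.strip (PySem.Str.slice (PySem.Str.rstrip raw) (some 3) none) == ""
        · simp [truthyA, ht]
        · simp [truthyA, ht]
      | some s =>
        by_cases hs : s == ""
        · by_cases ht : PySem.Str.strip (PySem.Str.slice (PySem.Str.rstrip raw) (some 3) none) == ""
          · simp [truthyA, hs, ht]
          · simp [truthyA, hs, ht]
        · by_cases ht : PySem.Str.strip (PySem.Str.slice (PySem.Str.rstrip raw) (some 3) none) == ""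
          · simp [truthyA, hs, ht]
          · simp [truthyA, hs, ht]
    · rw [if_neg hh]
      simp only [spanH, hh, if_neg, Bool.false_eq_true, not_false_eq_true]
      cases cv with
      | none => simp [truthyA, ih]
      | some s =>
        by_cases hs : s == ""
        · simp [truthyA, hs, ih]
        · simp only [truthyA, hs, Bool.not_false, if_pos, ih]
          simp [List.append_assoc]

theorem loopB_spec (raws : List String) :
    (raws.reverse.foldl stepB ([], [])).1 = (parseS (spanH (raws.map PySem.Str.rstrip)).2).reverse ∧
    (raws.reverse.foldl stepB ([], [])).2 = (spanH (raws.map PySem.Str.rstrip)).1.reverse := by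
  induction raws with
  | nil => simp [spanH, parseS]
  | cons raw rest ih =>
    rw [List.reverse_cons, List.foldl_append]
    obtain ⟨ih1, ih2⟩ := ih
    rw [List.foldl_reverse] at ih1 ih2
    simp only [List.foldl_cons, List.foldl_nil, List.map_cons]
    by_cases hh : PySem.Str.startswith (PySem.Str.rstrip raw) "## " = true
    · simp only [stepB, hh, if_pos, spanH, parseS]
      by_cases ht : PySem.Str.strip (PySem.Str.slice (PySem.Str.rstrip raw) (some 3) none) == ""
      · simp [ht, ih1]
      · simp [ht, ih1, ih2, bulletsA]
    · simp only [stepB, hh, Bool.false_eq_true, not_false_eq_true, if_neg, spanH]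
      exact ⟨by simpa using ih1, by simp [ih2]⟩

-- ===== VERDICT (by name: the statement is the Claim_ definition above) =====
theorem extract_latest_versions_spec : Claim_equal_extract_latest_versions := by
  intro t limit _
  unfold Spec_extract_latest_versions extract_latest_versions extract_latest_versions_alt
  simp only [loopA_spec, (loopB_spec (PySem.Str.splitlines t)).1]
  simp
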